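-- pv_equiv track=rewrite | github.com/rperera12/AKARI-LightUp-GameSolver-with-DeepNeuralNetworks-and-HillClimb-or-SimulatedAnnealing | EA/ea_old.py | check_bulb_shining
-- ===== SOURCE A (Python) =====
-- CELL_BULB_ZERO = 9
--
-- CELL_EMPTY = 6
--
-- CELL_BULB = 7
--
-- CELL_LIGHT = 8
--
-- def check_bulb_shining(puzzle_map, row, col):
--     # validation = True
--     # check the bulbs by every row
--     conflict = 0
--     for i in range(0, row):
--         start = 0
--         bulb = 0
--         for j in range(0, col):
--             cell = puzzle_map[i][j]
--             if cell == CELL_BULB: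
--                 bulb += 1
--             if (cell < CELL_EMPTY) or (j == col - 1):
--                 if bulb > 1:
--                     conflict += bulb - 1
--                 if bulb:
--                     for x in range(start, j + 1):
--                         if puzzle_map[i][x] == CELL_EMPTY or puzzle_map[i][x] == CELL_BULB_ZERO:
--                             puzzle_map[i][x] = CELL_LIGHT
--                     bulb = 0
--                 start = j
--
--     # check the bulbs by every column
--     for i in range(0, col):
--         start = 0
--         bulb = 0
--         for j in range(0, row):
--             cell = puzzle_map[j][i]
--             if cell == CELL_BULB:
--                 bulb += 1
--             if (cell < CELL_EMPTY) or (j == row - 1):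
--                 if bulb > 1:
--                     conflict += bulb - 1
--                 if bulb:
--                     for x in range(start, j + 1):
--                         if puzzle_map[x][i] == CELL_EMPTY or puzzle_map[x][i] == CELL_BULB_ZERO:
--                             puzzle_map[x][i] = CELL_LIGHT
--                     bulb = 0
--                 start = j
--
--     return conflict
-- ===== SOURCE B (Python) =====
-- CELL_BULB_ZERO = 9
-- CELL_EMPTY = 6
-- CELL_BULB = 7
-- CELL_LIGHT = 8
--
-- def _sees_bulb(cells):
--     # walk along a ray of cells; a bulb is visible iff one appears before any wall
--     for v in cells:
--         if v < CELL_EMPTY: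
--             return False
--         if v == CELL_BULB:
--             return True
--     return False
--
-- def check_bulb_shining(puzzle_map, row, col):
--     if row <= 0 or col <= 0:
--         return 0
--     conflict = 0
--     # a bulb contributes one conflict per line in which another bulb is visible before it
--     for i in range(row):
--         line = [puzzle_map[i][j] for j in range(col)]
--         for j in range(col):
--             if line[j] == CELL_BULB and _sees_bulb(list(reversed(line[:j]))):
--                 conflict += 1
--     for j in range(col):
--         line = [puzzle_map[i][j] for i in range(row)]
--         for i in range(row):
--             if line[i] == CELL_BULB and _sees_bulb(list(reversed(line[:i]))):
--                 conflict += 1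
--     # lighting: an empty (6/9) cell becomes lit iff a bulb is visible in some of the 4 directions
--     rows = [[puzzle_map[i][j] for j in range(col)] for i in range(row)]
--     cols = [[rows[i][j] for i in range(row)] for j in range(col)]
--     for i in range(row):
--         for j in range(col):
--             if rows[i][j] in (CELL_EMPTY, CELL_BULB_ZERO) and (
--                     _sees_bulb(list(reversed(rows[i][:j]))) or _sees_bulb(rows[i][j+1:]) or
--                     _sees_bulb(list(reversed(cols[j][:i]))) or _sees_bulb(cols[j][i+1:])):
--                 puzzle_map[i][j] = CELL_LIGHT
--     return conflict
-- ===== Notes on version B (the rewrite author's own statement) =====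
-- stated objective: alternative
-- what changed: B drops A's streaming run-detection (running start/bulb counters flushed at walls, with an inner rewrite loop per run) for a stateless per-cell visibility rule: a bulb counts one conflict per line in which another bulb is visible before it along a wall-free ray, and a 6/9 cell is lit iff a bulb is visible in one of the four directions; both mutate puzzle_map to the same final state and the proved equivalence is about the returned conflict count.
import Mathlib
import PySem

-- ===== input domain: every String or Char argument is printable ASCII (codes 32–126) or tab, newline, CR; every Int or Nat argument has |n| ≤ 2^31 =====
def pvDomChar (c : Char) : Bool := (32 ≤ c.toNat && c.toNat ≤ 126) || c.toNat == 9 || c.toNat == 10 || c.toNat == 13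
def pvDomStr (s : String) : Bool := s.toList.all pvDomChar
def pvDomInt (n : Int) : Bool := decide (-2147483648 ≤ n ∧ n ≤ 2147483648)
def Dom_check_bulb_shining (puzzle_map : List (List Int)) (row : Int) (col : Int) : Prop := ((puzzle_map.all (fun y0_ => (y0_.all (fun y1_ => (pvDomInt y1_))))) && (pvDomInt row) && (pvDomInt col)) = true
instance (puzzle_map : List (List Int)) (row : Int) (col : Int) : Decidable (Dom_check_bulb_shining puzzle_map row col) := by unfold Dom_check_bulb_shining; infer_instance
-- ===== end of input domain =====

-- B replaces A's streaming run-detection (running start/bulb counters flushed at walls) by a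
-- stateless per-bulb visibility rule; both mutate puzzle_map to the same final state, and the
-- theorems below are about the returned conflict count.

-- ===== PORT A =====
-- puzzle_map[i][j] (read) and puzzle_map[i][j] = v (write); all indices A uses are ≥ 0 and,
-- under Pre_, in range, where pyGetD/pySetD are exact.
def pvGet2 (m : List (List Int)) (i j : Int) : Int :=
  PySem.List.pyGetD (PySem.List.pyGetD m i []) j 0

def pvSet2 (m : List (List Int)) (i j v : Int) : List (List Int) :=
  PySem.List.pySetD m i (PySem.List.pySetD (PySem.List.pyGetD m i []) j v)

-- body of A's row-phase inner loop; state (puzzle_map, conflict, start, bulb)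
def pvRowStep (col : Int) (i : Int) (t : List (List Int) × Int × Int × Int) (j : Int) :
    List (List Int) × Int × Int × Int :=
  let cell := pvGet2 t.1 i j
  let bulb := if cell = 7 then t.2.2.2 + 1 else t.2.2.2
  if cell < 6 ∨ j = col - 1 then
    let conflict := if 1 < bulb then t.2.1 + (bulb - 1) else t.2.1
    let mb : List (List Int) × Int :=
      if bulb ≠ 0 then
        ((PySem.List.pyRange t.2.2.1 (j + 1) 1).foldl
          (fun m x => if pvGet2 m i x = 6 ∨ pvGet2 m i x = 9 then pvSet2 m i x 8 else m) t.1, 0)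
      else (t.1, bulb)
    (mb.1, conflict, j, mb.2)
  else (t.1, t.2.1, t.2.2.1, bulb)

-- body of A's column-phase inner loop
def pvColStep (row : Int) (i : Int) (t : List (List Int) × Int × Int × Int) (j : Int) :
    List (List Int) × Int × Int × Int :=
  let cell := pvGet2 t.1 j i
  let bulb := if cell = 7 then t.2.2.2 + 1 else t.2.2.2
  if cell < 6 ∨ j = row - 1 then
    let conflict := if 1 < bulb then t.2.1 + (bulb - 1) else t.2.1
    let mb : List (List Int) × Int :=
      if bulb ≠ 0 then
        ((PySem.List.pyRange t.2.2.1 (j + 1) 1).foldl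
          (fun m x => if pvGet2 m x i = 6 ∨ pvGet2 m x i = 9 then pvSet2 m x i 8 else m) t.1, 0)
      else (t.1, bulb)
    (mb.1, conflict, j, mb.2)
  else (t.1, t.2.1, t.2.2.1, bulb)

def check_bulb_shining (puzzle_map : List (List Int)) (row : Int) (col : Int) : Int :=
  let s1 := (PySem.List.pyRange 0 row 1).foldl
    (fun (s : List (List Int) × Int) i =>
      let t := (PySem.List.pyRange 0 col 1).foldl (pvRowStep col i) (s.1, s.2, 0, 0)
      (t.1, t.2.1)) (puzzle_map, 0)
  let s2 := (PySem.List.pyRange 0 col 1).foldl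
    (fun (s : List (List Int) × Int) i =>
      let t := (PySem.List.pyRange 0 row 1).foldl (pvColStep row i) (s.1, s.2, 0, 0)
      (t.1, t.2.1)) s1
  s2.2

-- ===== PORT B =====
-- _sees_bulb(cells): first bulb before any wall along a ray
def seesBulbB : List Int → Bool
  | [] => false
  | v :: rest => if v < 6 then false else if v = 7 then true else seesBulbB rest

-- line = [puzzle_map[i][j] for j in range(col)]
def lineRowB (m : List (List Int)) (col i : Int) : List Int :=
  (PySem.List.pyRange 0 col 1).map (fun j => pvGet2 m i j)

-- line = [puzzle_map[i][j] for i in range(row)]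
def lineColB (m : List (List Int)) (row j : Int) : List Int :=
  (PySem.List.pyRange 0 row 1).map (fun i => pvGet2 m i j)

-- the inner 'for j in range(n): if line[j]==7 and _sees_bulb(list(reversed(line[:j]))): conflict+=1';
-- line[:j] is ported as take j.toNat (exact: j comes from range(n), so 0 ≤ j)
def lineCountFromB (line : List Int) (n : Int) (conflict : Int) : Int :=
  (PySem.List.pyRange 0 n 1).foldl (fun acc j =>
    if PySem.List.pyGetD line j 0 = 7 ∧ seesBulbB ((line.take j.toNat).reverse) = true
    then acc + 1 else acc) conflict

-- B's final lighting loop only mutates puzzle_map (it reads a snapshot and never touches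
-- `conflict`), so it does not appear in this port of the returned value.
def check_bulb_shining_alt (puzzle_map : List (List Int)) (row : Int) (col : Int) : Int :=
  if row ≤ 0 ∨ col ≤ 0 then 0
  else
    (PySem.List.pyRange 0 col 1).foldl
      (fun conflict j => lineCountFromB (lineColB puzzle_map row j) row conflict)
      ((PySem.List.pyRange 0 row 1).foldl
        (fun conflict i => lineCountFromB (lineRowB puzzle_map col i) col conflict) 0)

-- ===== PRECONDITION & SPEC =====
-- Pre_ excludes exactly the inputs where Python A raises IndexError: when both bounds are
-- positive, the map must have at least `row` rows and each of those rows at least `col` cells.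
def Pre_check_bulb_shining (puzzle_map : List (List Int)) (row : Int) (col : Int) : Prop :=
  0 < row → 0 < col →
    (row.toNat ≤ puzzle_map.length ∧ ∀ r ∈ puzzle_map.take row.toNat, col.toNat ≤ r.length)
instance (puzzle_map : List (List Int)) (row : Int) (col : Int) :
    Decidable (Pre_check_bulb_shining puzzle_map row col) := by
  unfold Pre_check_bulb_shining; infer_instance

def pvWitness_check_bulb_shining : List (List Int) × Int × Int := ([[7, 6], [6, 7]], 2, 2)

def Spec_check_bulb_shining (puzzle_map : List (List Int)) (row : Int) (col : Int) (out : Int) : Prop := out = check_bulb_shining_alt puzzle_map row col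
instance (puzzle_map : List (List Int)) (row : Int) (col : Int) (out : Int) : Decidable (Spec_check_bulb_shining puzzle_map row col out) := by unfold Spec_check_bulb_shining; infer_instance

-- ===== CLAIM (what is proved, stated in full; the proofs are below) =====
def Claim_equal_check_bulb_shining : Prop := ∀ (puzzle_map : List (List Int)) (row : Int) (col : Int), Dom_check_bulb_shining puzzle_map row col → Pre_check_bulb_shining puzzle_map row col → Spec_check_bulb_shining puzzle_map row col (check_bulb_shining puzzle_map row col)

-- ===== LEMMAS AND PROOFS =====

def cellRel (a b : Int) : Prop := b = a ∨ ((a = 6 ∨ a = 9) ∧ b = 8)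
def pvRel (m0 m : List (List Int)) : Prop := List.Forall₂ (List.Forall₂ cellRel) m0 m

theorem pvRel_refl (m0 : List (List Int)) : pvRel m0 m0 := by
  apply List.forall₂_same.2
  intro x _
  apply List.forall₂_same.2
  intro a _
  exact Or.inl rfl

theorem cellRel_seven {a b : Int} (h : cellRel a b) : (b = 7) = (a = 7) := by
  unfold cellRel at h
  apply propext
  constructor <;> intro hx <;> omega

theorem cellRel_lt6 {a b : Int} (h : cellRel a b) : (b < 6) = (a < 6) := by
  unfold cellRel at h
  apply propext
  constructor <;> intro hx <;> omega

theorem rel_getD {α β : Type} {R : α → β → Prop} :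
    ∀ {l1 : List α} {l2 : List β}, List.Forall₂ R l1 l2 → ∀ (n : Nat) {d1 : α} {d2 : β},
      R d1 d2 → R (l1.getD n d1) (l2.getD n d2) := by
  intro l1 l2 h
  induction h with
  | nil => intro n _ _ hd; simpa using hd
  | cons ha _ ih =>
    intro n d1 d2 hd
    cases n with
    | zero => simpa using ha
    | succ k => simpa using ih k hd

theorem forall₂_set_right {α β : Type} {R : α → β → Prop} :
    ∀ {l1 : List α} {l2 : List β}, List.Forall₂ R l1 l2 → ∀ (k : Nat) (b : β) (d : α),
      R (l1.getD k d) b → k < l1.length → List.Forall₂ R l1 (l2.set k b) := by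
  intro l1 l2 h
  induction h with
  | nil => intro k b d _ hk; simp at hk
  | cons ha htail ih =>
    intro k b d hb hk
    cases k with
    | zero => simpa using List.Forall₂.cons (by simpa using hb) htail
    | succ k =>
      simp only [List.set_cons_succ]
      exact List.Forall₂.cons ha (ih k b d (by simpa using hb) (by simpa using hk))

theorem rel_pvGet2 {m0 m : List (List Int)} (h : pvRel m0 m) {i j : Int}
    (hi : 0 ≤ i) (hj : 0 ≤ j) : cellRel (pvGet2 m0 i j) (pvGet2 m i j) := by
  unfold pvGet2
  rw [PySem.List.pyGetD_of_nonneg _ _ hi, PySem.List.pyGetD_of_nonneg _ _ hi,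
      PySem.List.pyGetD_of_nonneg _ _ hj, PySem.List.pyGetD_of_nonneg _ _ hj]
  exact rel_getD (rel_getD h i.toNat List.Forall₂.nil) j.toNat (Or.inl rfl)

theorem rel_pvSet2 {m0 m : List (List Int)} (h : pvRel m0 m) {i j : Int}
    (hi : 0 ≤ i) (hj : 0 ≤ j) (hv : pvGet2 m i j = 6 ∨ pvGet2 m i j = 9) :
    pvRel m0 (pvSet2 m i j 8) := by
  have hlen : m0.length = m.length := h.length_eq
  unfold pvGet2 at hv
  rw [PySem.List.pyGetD_of_nonneg _ _ hi, PySem.List.pyGetD_of_nonneg _ _ hj] at hv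
  have hi' : i.toNat < m.length := by
    by_contra hc
    rw [List.getD_eq_default m [] (Nat.le_of_not_lt hc)] at hv
    simp at hv
  have hrowrel : List.Forall₂ cellRel (m0.getD i.toNat []) (m.getD i.toNat []) :=
    rel_getD h i.toNat List.Forall₂.nil
  have hj' : j.toNat < (m.getD i.toNat []).length := by
    by_contra hc
    have h0 : (m.getD i.toNat []).getD j.toNat 0 = 0 :=
      List.getD_eq_default _ _ (by omega)
    omega
  have hcell : cellRel ((m0.getD i.toNat []).getD j.toNat 0) ((m.getD i.toNat []).getD j.toNat 0) :=
    rel_getD hrowrel j.toNat (Or.inl rfl)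
  have hcell9 : (m0.getD i.toNat []).getD j.toNat 0 = 6 ∨ (m0.getD i.toNat []).getD j.toNat 0 = 9 := by
    unfold cellRel at hcell; omega
  unfold pvSet2
  rw [PySem.List.pySetD_of_nonneg _ _ hi, PySem.List.pySetD_of_nonneg _ _ hj,
      PySem.List.pyGetD_of_nonneg _ _ hi]
  have hj0 : j.toNat < (m0.getD i.toNat []).length := by
    rw [hrowrel.length_eq]; exact hj'
  apply forall₂_set_right h i.toNat _ []
  · apply forall₂_set_right hrowrel j.toNat 8 0
    · exact Or.inr ⟨hcell9, rfl⟩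
    · exact hj0
  · omega

theorem rel_light_step {m0 m : List (List Int)} (h : pvRel m0 m) {i j : Int}
    (hi : 0 ≤ i) (hj : 0 ≤ j) :
    pvRel m0 (if pvGet2 m i j = 6 ∨ pvGet2 m i j = 9 then pvSet2 m i j 8 else m) := by
  split
  · exact rel_pvSet2 h hi hj (by assumption)
  · exact h

theorem rel_lightFold {m0 : List (List Int)} :
    ∀ (ps : List (Int × Int)) (m : List (List Int)), pvRel m0 m →
      (∀ p ∈ ps, 0 ≤ p.1 ∧ 0 ≤ p.2) →
      pvRel m0 (ps.foldl (fun m p =>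
        if pvGet2 m p.1 p.2 = 6 ∨ pvGet2 m p.1 p.2 = 9 then pvSet2 m p.1 p.2 8 else m) m) := by
  intro ps
  induction ps with
  | nil => intro m h _; exact h
  | cons p rest ih =>
    intro m h hps
    simp only [List.foldl_cons]
    exact ih _ (rel_light_step h (hps p (by simp)).1 (hps p (by simp)).2)
      (fun q hq => hps q (by simp [hq]))

def lcA : List Int → Int → Int
  | [], _ => 0
  | v :: rest, b =>
    let b' := if v = 7 then b + 1 else b
    if v < 6 ∨ rest = [] then (if 1 < b' then b' - 1 else 0) + lcA rest 0 else lcA rest b'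

def lcB : List Int → Int → Int
  | [], b => if 1 < b then b - 1 else 0
  | v :: rest, b =>
    if v < 6 then (if 1 < b then b - 1 else 0) + lcB rest 0
    else lcB rest (if v = 7 then b + 1 else b)

theorem lcA_cons (v : Int) (rest : List Int) (b : Int) :
    lcA (v :: rest) b =
      if v < 6 ∨ rest = [] then
        (if 1 < (if v = 7 then b + 1 else b) then (if v = 7 then b + 1 else b) - 1 else 0) + lcA rest 0
      else lcA rest (if v = 7 then b + 1 else b) := rfl

theorem lcB_cons (v : Int) (rest : List Int) (b : Int) :
    lcB (v :: rest) b =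
      if v < 6 then (if 1 < b then b - 1 else 0) + lcB rest 0
      else lcB rest (if v = 7 then b + 1 else b) := rfl

theorem lcA_eq_lcB : ∀ (vs : List Int) (b : Int), vs ≠ [] → lcA vs b = lcB vs b := by
  intro vs
  induction vs with
  | nil => intro b h; exact absurd rfl h
  | cons v rest ih =>
    intro b _
    rw [lcA_cons, lcB_cons]
    cases rest with
    | nil =>
      rw [if_pos (Or.inr rfl)]
      by_cases h6 : v < 6
      · have h7 : ¬ v = 7 := by omega
        rw [if_pos h6, if_neg h7]
        simp [lcA, lcB]
      · rw [if_neg h6]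
        simp [lcA, lcB]
    | cons w rest' =>
      by_cases h6 : v < 6
      · have h7 : ¬ v = 7 := by omega
        rw [if_pos (Or.inl h6), if_pos h6, if_neg h7, ih _ (by simp)]
      · have hcond : ¬ (v < 6 ∨ (w :: rest') = ([] : List Int)) := by simp [h6]
        rw [if_neg hcond, if_neg h6, ih _ (by simp)]

def stepA (n : Int) (pos : Int → Int × Int) (t : List (List Int) × Int × Int × Int) (j : Int) :
    List (List Int) × Int × Int × Int :=
  let cell := pvGet2 t.1 (pos j).1 (pos j).2
  let bulb := if cell = 7 then t.2.2.2 + 1 else t.2.2.2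
  if cell < 6 ∨ j = n - 1 then
    let conflict := if 1 < bulb then t.2.1 + (bulb - 1) else t.2.1
    let mb : List (List Int) × Int :=
      if bulb ≠ 0 then
        ((PySem.List.pyRange t.2.2.1 (j + 1) 1).foldl
          (fun m x => if pvGet2 m (pos x).1 (pos x).2 = 6 ∨ pvGet2 m (pos x).1 (pos x).2 = 9
            then pvSet2 m (pos x).1 (pos x).2 8 else m) t.1, 0)
      else (t.1, bulb)
    (mb.1, conflict, j, mb.2)
  else (t.1, t.2.1, t.2.2.1, bulb)

theorem pvRowStep_eq (col i : Int) : pvRowStep col i = stepA col (fun j => (i, j)) := rfl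

theorem pvColStep_eq (row i : Int) : pvColStep row i = stepA row (fun j => (j, i)) := rfl

def vals0 (m0 : List (List Int)) (pos : Int → Int × Int) (js : List Int) : List Int :=
  js.map (fun j => pvGet2 m0 (pos j).1 (pos j).2)

theorem vals0_nil (m0 : List (List Int)) (pos : Int → Int × Int) : vals0 m0 pos [] = [] := rfl

theorem vals0_cons (m0 : List (List Int)) (pos : Int → Int × Int) (j : Int) (js : List Int) :
    vals0 m0 pos (j :: js) = pvGet2 m0 (pos j).1 (pos j).2 :: vals0 m0 pos js := rfl

def lightF (pos : Int → Int × Int) (start stop : Int) (m : List (List Int)) : List (List Int) :=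
  (PySem.List.pyRange start stop 1).foldl
    (fun m x => if pvGet2 m (pos x).1 (pos x).2 = 6 ∨ pvGet2 m (pos x).1 (pos x).2 = 9
      then pvSet2 m (pos x).1 (pos x).2 8 else m) m

theorem rel_lightF {m0 m : List (List Int)} (pos : Int → Int × Int)
    (hpos : ∀ j, 0 ≤ j → 0 ≤ (pos j).1 ∧ 0 ≤ (pos j).2)
    (h : pvRel m0 m) {start stop : Int} (hstart : 0 ≤ start) :
    pvRel m0 (lightF pos start stop m) := by
  have h2 := rel_lightFold (m0 := m0) ((PySem.List.pyRange start stop 1).map pos) m h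
    (by
      intro p hp
      rcases List.mem_map.1 hp with ⟨x, hx, rfl⟩
      exact hpos x (le_trans hstart (PySem.List.mem_pyRange_one.1 hx).1))
  rw [List.foldl_map] at h2
  exact h2

theorem stepA_flush (n : Int) (pos : Int → Int × Int) (m : List (List Int))
    (conf start bulb j : Int)
    (hcond : pvGet2 m (pos j).1 (pos j).2 < 6 ∨ j = n - 1) :
    stepA n pos (m, conf, start, bulb) j =
      ((if (if pvGet2 m (pos j).1 (pos j).2 = 7 then bulb + 1 else bulb) ≠ 0
          then lightF pos start (j + 1) m else m),
       (if 1 < (if pvGet2 m (pos j).1 (pos j).2 = 7 then bulb + 1 else bulb)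
          then conf + ((if pvGet2 m (pos j).1 (pos j).2 = 7 then bulb + 1 else bulb) - 1) else conf),
       j,
       (if (if pvGet2 m (pos j).1 (pos j).2 = 7 then bulb + 1 else bulb) ≠ 0
          then 0 else (if pvGet2 m (pos j).1 (pos j).2 = 7 then bulb + 1 else bulb))) := by
  unfold stepA lightF
  dsimp only
  rw [if_pos hcond]
  by_cases hb : (if pvGet2 m (pos j).1 (pos j).2 = 7 then bulb + 1 else bulb) ≠ 0
  · rw [if_pos hb, if_pos hb, if_pos hb]
  · rw [if_neg hb, if_neg hb, if_neg hb]

theorem stepA_pass (n : Int) (pos : Int → Int × Int) (m : List (List Int))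
    (conf start bulb j : Int)
    (hcond : ¬ (pvGet2 m (pos j).1 (pos j).2 < 6 ∨ j = n - 1)) :
    stepA n pos (m, conf, start, bulb) j =
      (m, conf, start, (if pvGet2 m (pos j).1 (pos j).2 = 7 then bulb + 1 else bulb)) := by
  unfold stepA
  dsimp only
  rw [if_neg hcond]

theorem innerA (m0 : List (List Int)) (n : Int) (pos : Int → Int × Int)
    (hpos : ∀ j, 0 ≤ j → 0 ≤ (pos j).1 ∧ 0 ≤ (pos j).2) :
    ∀ (k : Nat), 1 ≤ k → ∀ (a : Int) (m : List (List Int)) (conf start bulb : Int),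
      0 ≤ a → a + k = n → pvRel m0 m → 0 ≤ start →
      ((PySem.List.pyRange a n 1).foldl (stepA n pos) (m, conf, start, bulb)).2.1
          = conf + lcA (vals0 m0 pos (PySem.List.pyRange a n 1)) bulb
        ∧ pvRel m0 ((PySem.List.pyRange a n 1).foldl (stepA n pos) (m, conf, start, bulb)).1
        ∧ 0 ≤ ((PySem.List.pyRange a n 1).foldl (stepA n pos) (m, conf, start, bulb)).2.2.1 := by
  intro k
  induction k with
  | zero => omega
  | succ k ih =>
    intro _ a m conf start bulb ha hn hRel hstart
    have hn' : a + (k : Int) + 1 = n := by push_cast at hn; omega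
    have han : a < n := by omega
    rw [PySem.List.pyRange_one_cons han]
    have hcr := rel_pvGet2 hRel (hpos a ha).1 (hpos a ha).2
    have h7 := cellRel_seven hcr
    have h6 := cellRel_lt6 hcr
    simp only [vals0_cons, List.foldl_cons]
    rcases Nat.eq_zero_or_pos k with hk0 | hk1
    · subst hk0
      have hlast : a = n - 1 := by omega
      rw [PySem.List.pyRange_one_eq_nil (by omega : n ≤ a + 1)]
      rw [stepA_flush n pos m conf start bulb a (Or.inr hlast)]
      rw [vals0_nil]
      simp only [List.foldl_nil]
      rw [lcA_cons, if_pos (Or.inr rfl)]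
      refine ⟨?_, ?_, ha⟩
      · dsimp only
        simp only [h7]
        simp only [lcA]
        split <;> omega
      · dsimp only
        by_cases hb : (if pvGet2 m (pos a).1 (pos a).2 = 7 then bulb + 1 else bulb) ≠ 0
        · rw [if_pos hb]
          exact rel_lightF pos hpos hRel hstart
        · rw [if_neg hb]
          exact hRel
    · have hnl : ¬ a = n - 1 := by omega
      have hrest : (1:Nat) ≤ k := hk1
      by_cases hc6 : pvGet2 m (pos a).1 (pos a).2 < 6
      · have h7m : ¬ pvGet2 m (pos a).1 (pos a).2 = 7 := by omega
        rw [stepA_flush n pos m conf start bulb a (Or.inl hc6)]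
        rw [if_neg h7m]
        have hz : (if bulb ≠ 0 then (0:Int) else bulb) = 0 := by split <;> omega
        rw [hz]
        have hrelM : pvRel m0 (if bulb ≠ 0 then lightF pos start (a + 1) m else m) := by
          by_cases hb : bulb ≠ 0
          · rw [if_pos hb]
            exact rel_lightF pos hpos hRel hstart
          · rw [if_neg hb]
            exact hRel
        obtain ⟨e1, e2, e3⟩ := ih hrest (a + 1)
          (if bulb ≠ 0 then lightF pos start (a + 1) m else m)
          (if 1 < bulb then conf + (bulb - 1) else conf) a 0
          (by omega) (by omega) hrelM ha
        refine ⟨?_, e2, e3⟩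
        rw [e1]
        have h70 : ¬ pvGet2 m0 (pos a).1 (pos a).2 = 7 := by rw [← h7]; exact h7m
        rw [lcA_cons, if_pos (Or.inl (by rw [← h6]; exact hc6)), if_neg h70]
        split <;> ring
      · rw [stepA_pass n pos m conf start bulb a (by
          rw [not_or]
          exact ⟨hc6, hnl⟩)]
        obtain ⟨e1, e2, e3⟩ := ih hrest (a + 1) m conf start
          (if pvGet2 m (pos a).1 (pos a).2 = 7 then bulb + 1 else bulb)
          (by omega) (by omega) hRel hstart
        refine ⟨?_, e2, e3⟩
        rw [e1]
        have hvne : vals0 m0 pos (PySem.List.pyRange (a+1) n 1) ≠ [] := by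
          rw [PySem.List.pyRange_one_cons (by omega : a + 1 < n), vals0_cons]
          simp
        have hcond0 : ¬ (pvGet2 m0 (pos a).1 (pos a).2 < 6
            ∨ vals0 m0 pos (PySem.List.pyRange (a + 1) n 1) = []) := by
          rw [not_or]
          exact ⟨by rw [← h6]; exact hc6, hvne⟩
        rw [lcA_cons, if_neg hcond0]
        simp only [h7]

theorem phaseA (m0 : List (List Int)) (nInner : Int) (pos2 : Int → Int → Int × Int)
    (hpos : ∀ i j, 0 ≤ i → 0 ≤ j → 0 ≤ (pos2 i j).1 ∧ 0 ≤ (pos2 i j).2) :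
    ∀ (is : List Int) (m : List (List Int)) (conf : Int),
      (∀ i ∈ is, 0 ≤ i) → pvRel m0 m →
      (is.foldl (fun (s : List (List Int) × Int) i =>
          (((PySem.List.pyRange 0 nInner 1).foldl (stepA nInner (pos2 i)) (s.1, s.2, 0, 0)).1,
           ((PySem.List.pyRange 0 nInner 1).foldl (stepA nInner (pos2 i)) (s.1, s.2, 0, 0)).2.1)) (m, conf)).2
        = conf + (is.map (fun i => lcA (vals0 m0 (pos2 i) (PySem.List.pyRange 0 nInner 1)) 0)).sum
      ∧ pvRel m0 (is.foldl (fun (s : List (List Int) × Int) i =>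
          (((PySem.List.pyRange 0 nInner 1).foldl (stepA nInner (pos2 i)) (s.1, s.2, 0, 0)).1,
           ((PySem.List.pyRange 0 nInner 1).foldl (stepA nInner (pos2 i)) (s.1, s.2, 0, 0)).2.1)) (m, conf)).1 := by
  intro is
  induction is with
  | nil =>
    intro m conf _ hRel
    exact ⟨by simp, hRel⟩
  | cons i rest ih =>
    intro m conf hnn hRel
    have hi : 0 ≤ i := hnn i (by simp)
    simp only [List.foldl_cons, List.map_cons, List.sum_cons]
    by_cases hn0 : nInner ≤ 0
    · have hnil : PySem.List.pyRange 0 nInner 1 = [] := PySem.List.pyRange_one_eq_nil hn0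
      have hini : ((((PySem.List.pyRange 0 nInner 1).foldl (stepA nInner (pos2 i)) (m, conf, 0, 0)).1,
           ((PySem.List.pyRange 0 nInner 1).foldl (stepA nInner (pos2 i)) (m, conf, 0, 0)).2.1))
          = (m, conf) := by
        rw [hnil]
        rfl
      rw [hini]
      have hline : lcA (vals0 m0 (pos2 i) (PySem.List.pyRange 0 nInner 1)) 0 = 0 := by
        rw [hnil, vals0_nil]
        rfl
      rw [hline]
      obtain ⟨e, r⟩ := ih m conf (fun x hx => hnn x (by simp [hx])) hRel
      exact ⟨by rw [e]; ring, r⟩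
    · have hn0' : 0 < nInner := by omega
      obtain ⟨e1, r1, _⟩ := innerA m0 nInner (pos2 i) (fun j hj => hpos i j hi hj)
        nInner.toNat (by omega) 0 m conf 0 0 le_rfl (by omega) hRel le_rfl
      rw [e1]
      obtain ⟨e, r⟩ := ih (((PySem.List.pyRange 0 nInner 1).foldl (stepA nInner (pos2 i)) (m, conf, 0, 0)).1)
        (conf + lcA (vals0 m0 (pos2 i) (PySem.List.pyRange 0 nInner 1)) 0)
        (fun x hx => hnn x (by simp [hx])) r1
      exact ⟨by rw [e]; ring, r⟩

theorem A_char (m0 : List (List Int)) (row col : Int) :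
    check_bulb_shining m0 row col
      = ((PySem.List.pyRange 0 row 1).map
          (fun i => lcA (vals0 m0 (fun j => (i, j)) (PySem.List.pyRange 0 col 1)) 0)).sum
        + ((PySem.List.pyRange 0 col 1).map
          (fun i => lcA (vals0 m0 (fun j => (j, i)) (PySem.List.pyRange 0 row 1)) 0)).sum := by
  unfold check_bulb_shining
  simp only [pvRowStep_eq, pvColStep_eq]
  obtain ⟨e1, r1⟩ := phaseA m0 col (fun i j => (i, j))
    (fun i j hi hj => ⟨hi, hj⟩) (PySem.List.pyRange 0 row 1) m0 0
    (fun i hi => (PySem.List.mem_pyRange_one.1 hi).1) (pvRel_refl m0)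
  obtain ⟨e2, r2⟩ := phaseA m0 row (fun i j => (j, i))
    (fun i j hi hj => ⟨hj, hi⟩) (PySem.List.pyRange 0 col 1)
    ((List.foldl (fun (s : List (List Int) × Int) i =>
        (((PySem.List.pyRange 0 col 1).foldl (stepA col (fun j => (i, j))) (s.1, s.2, 0, 0)).1,
         ((PySem.List.pyRange 0 col 1).foldl (stepA col (fun j => (i, j))) (s.1, s.2, 0, 0)).2.1))
      (m0, 0) (PySem.List.pyRange 0 row 1)).1)
    ((List.foldl (fun (s : List (List Int) × Int) i =>
        (((PySem.List.pyRange 0 col 1).foldl (stepA col (fun j => (i, j))) (s.1, s.2, 0, 0)).1,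
         ((PySem.List.pyRange 0 col 1).foldl (stepA col (fun j => (i, j))) (s.1, s.2, 0, 0)).2.1))
      (m0, 0) (PySem.List.pyRange 0 row 1)).2)
    (fun i hi => (PySem.List.mem_pyRange_one.1 hi).1) r1
  rw [Prod.mk.eta] at e2
  rw [e2, e1]
  ring

-- ===== B-side lemmas: per-bulb visibility counting equals run counting =====

-- run-state form of the line conflict: the Bool says 'the current run already contains a bulb'
def lcS : List Int → Bool → Int
  | [], _ => 0
  | v :: rest, s =>
    if v < 6 then lcS rest false
    else if v = 7 then (if s then 1 else 0) + lcS rest true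
    else lcS rest s

theorem lcB_eq_lcS : ∀ (vs : List Int) (b : Int), 0 ≤ b →
    lcB vs b = lcS vs (decide (1 ≤ b)) + (if 1 < b then b - 1 else 0) := by
  intro vs
  induction vs with
  | nil => intro b hb; simp [lcB, lcS]
  | cons v rest ih =>
    intro b hb
    rw [lcB_cons]
    by_cases h6 : v < 6
    · have h7 : ¬ v = 7 := by omega
      simp only [lcS, if_pos h6]
      rw [ih 0 le_rfl]
      simp
      ring
    · by_cases h7 : v = 7
      · simp only [lcS, if_neg h6, if_pos h7, if_neg h6]
        rw [ih (b + 1) (by omega)]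
        have hd : decide (1 ≤ b + 1) = true := by simp; omega
        rw [hd]
        by_cases hb1 : 1 ≤ b
        · have : decide (1 ≤ b) = true := by simp; omega
          rw [this]
          simp only [if_pos trivial, if_true]
          split_ifs <;> omega
        · have hb0 : b = 0 := by omega
          subst hb0
          simp
      · simp only [lcS, if_neg h6, if_neg h7]
        rw [ih b hb]

theorem lcS_cons (v : Int) (rest : List Int) (s : Bool) :
    lcS (v :: rest) s =
      if v < 6 then lcS rest false
      else if v = 7 then (if s then 1 else 0) + lcS rest true
      else lcS rest s := rfl

theorem seesBulbB_cons (v : Int) (p : List Int) :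
    seesBulbB (v :: p) = if v < 6 then false else if v = 7 then true else seesBulbB p := rfl

-- the inner index loop of B computes lcS over the rest of the line
theorem innerB (vs : List Int) :
    ∀ (k a : Nat), a + k = vs.length → ∀ (c : Int),
      (PySem.List.pyRange (a : Int) (vs.length : Int) 1).foldl (fun acc j =>
        if PySem.List.pyGetD vs j 0 = 7 ∧ seesBulbB ((vs.take j.toNat).reverse) = true
        then acc + 1 else acc) c
      = c + lcS (vs.drop a) (seesBulbB ((vs.take a).reverse)) := by
  intro k
  induction k with
  | zero =>
    intro a ha c
    rw [PySem.List.pyRange_one_eq_nil (by omega : (vs.length : Int) ≤ (a : Int))]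
    rw [List.drop_eq_nil_of_le (by omega)]
    simp [lcS]
  | succ k ih =>
    intro a ha c
    have halt : a < vs.length := by omega
    rw [PySem.List.pyRange_one_cons (by exact_mod_cast halt : (a : Int) < (vs.length : Int))]
    rw [List.foldl_cons]
    have hget : PySem.List.pyGetD vs (a : Int) 0 = vs.getD a 0 := by
      rw [PySem.List.pyGetD_of_nonneg _ _ (by omega : (0:Int) ≤ (a : Int)), Int.toNat_natCast]
    have htn : ((a : Int)).toNat = a := by omega
    have hdrop : vs.drop a = vs.getD a 0 :: vs.drop (a + 1) := by
      rw [List.getD_eq_getElem vs 0 halt]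
      exact List.drop_eq_getElem_cons halt
    have htake : vs.take (a + 1) = vs.take a ++ [vs.getD a 0] := by
      rw [List.getD_eq_getElem vs 0 halt, List.take_succ, List.getElem?_eq_getElem halt]
      rfl
    have hcast : ((a : Int) + 1) = ((a + 1 : Nat) : Int) := by push_cast; ring
    rw [hget, htn, hcast, ih (a + 1) (by omega)]
    rw [hdrop, htake, List.reverse_append, List.reverse_singleton]
    simp only [List.singleton_append, seesBulbB_cons, lcS_cons]
    by_cases h6 : vs[a]?.getD 0 < 6
    · have h7 : ¬ vs[a]?.getD 0 = 7 := by omega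
      simp [h6, h7]
    · by_cases h7 : vs[a]?.getD 0 = 7
      · by_cases hs : seesBulbB ((vs.take a).reverse) = true
        · simp [h6, h7, hs]
          ring
        · simp [h6, h7, hs]
      · simp [h6, h7]

theorem lineCountFromB_eq (vs : List Int) (n : Int) (hn : 0 ≤ n)
    (hlen : vs.length = n.toNat) (c : Int) :
    lineCountFromB vs n c = c + lcS vs false := by
  have hn' : (vs.length : Int) = n := by omega
  unfold lineCountFromB
  rw [← hn']
  have := innerB vs vs.length 0 (by omega) c
  simpa using this

-- for a nonempty line the per-bulb count equals A's run count
theorem lcS_eq_lcA (vs : List Int) (h : vs ≠ []) : lcS vs false = lcA vs 0 := by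
  rw [lcA_eq_lcB vs 0 h]
  rw [lcB_eq_lcS vs 0 le_rfl]
  simp

theorem lineRowB_eq (m : List (List Int)) (col i : Int) :
    lineRowB m col i = vals0 m (fun j => (i, j)) (PySem.List.pyRange 0 col 1) := rfl

theorem lineColB_eq (m : List (List Int)) (row j : Int) :
    lineColB m row j = vals0 m (fun i => (i, j)) (PySem.List.pyRange 0 row 1) := rfl

theorem B_char (m0 : List (List Int)) (row col : Int) (h0 : ¬ (row ≤ 0 ∨ col ≤ 0)) :
    check_bulb_shining_alt m0 row col
      = ((PySem.List.pyRange 0 row 1).map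
          (fun i => lcA (vals0 m0 (fun j => (i, j)) (PySem.List.pyRange 0 col 1)) 0)).sum
        + ((PySem.List.pyRange 0 col 1).map
          (fun i => lcA (vals0 m0 (fun j => (j, i)) (PySem.List.pyRange 0 row 1)) 0)).sum := by
  have hrow : 0 < row := by omega
  have hcol : 0 < col := by omega
  unfold check_bulb_shining_alt
  rw [if_neg h0]
  have hstep1 : ∀ (c i : Int),
      lineCountFromB (lineRowB m0 col i) col c
        = c + lcA (vals0 m0 (fun j => (i, j)) (PySem.List.pyRange 0 col 1)) 0 := by
    intro c i
    rw [lineCountFromB_eq _ col (by omega)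
      (by simp [lineRowB, PySem.List.length_pyRange_one])]
    rw [lineRowB_eq, lcS_eq_lcA]
    rw [PySem.List.pyRange_one_cons hcol, vals0_cons]
    simp
  have hstep2 : ∀ (c j : Int),
      lineCountFromB (lineColB m0 row j) row c
        = c + lcA (vals0 m0 (fun i => (i, j)) (PySem.List.pyRange 0 row 1)) 0 := by
    intro c j
    rw [lineCountFromB_eq _ row (by omega)
      (by simp [lineColB, PySem.List.length_pyRange_one])]
    rw [lineColB_eq, lcS_eq_lcA]
    rw [PySem.List.pyRange_one_cons hrow, vals0_cons]
    simp
  rw [PySem.List.foldl_congr_mem (PySem.List.pyRange 0 row 1) _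
      (fun acc i => acc + lcA (vals0 m0 (fun j => (i, j)) (PySem.List.pyRange 0 col 1)) 0) 0
      (fun acc x _ => hstep1 acc x)]
  rw [PySem.List.foldl_add]
  rw [PySem.List.foldl_congr_mem (PySem.List.pyRange 0 col 1) _
      (fun acc j => acc + lcA (vals0 m0 (fun i => (i, j)) (PySem.List.pyRange 0 row 1)) 0) _
      (fun acc x _ => hstep2 acc x)]
  rw [PySem.List.foldl_add]
  ring

-- ===== VERDICT (by name: the statement is the Claim_ definition above) =====
theorem check_bulb_shining_spec : Claim_equal_check_bulb_shining := by
  intro m row col hDom hPre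
  unfold Spec_check_bulb_shining
  by_cases h0 : row ≤ 0 ∨ col ≤ 0
  · unfold check_bulb_shining_alt
    rw [if_pos h0]
    rw [A_char]
    rcases h0 with h0 | h0
    · rw [PySem.List.pyRange_one_eq_nil h0]
      simp [vals0_nil, lcA]
    · rw [PySem.List.pyRange_one_eq_nil h0]
      simp [vals0_nil, lcA]
  · rw [A_char, B_char m row col h0]
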